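-- pv_equiv track=rewrite | github.com/liuxh0/amazon-oa2020 | optimal_utilization.py | optional_utilization
-- ===== SOURCE A (Python) =====
-- import collections
-- import itertools
-- from typing import List
--
-- def optional_utilization(a: List[List[int]], b: List[List[int]], target: int) -> List[List[int]]:
--     a_dict = collections.defaultdict(list)
--     for e in a:
--         id, value = e
--         a_dict[value].append(id)
--
--     b_dict = collections.defaultdict(list)
--     for e in b:
--         id, value = e
--         b_dict[value].append(id)
--
--     a_values = sorted(list(a_dict.keys()))
--     b_values = sorted(list(b_dict.keys()))
--
--     pa, pb = 0, len(b_values) - 1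
--     sum_dict = collections.defaultdict(list)
--     max_sum = 0
--     while pa < len(a_values) and pb >= 0:
--         s = a_values[pa] + b_values[pb]
--         if s <= target:
--             if s >= max_sum:
--                 max_sum = s
--                 sum_dict[s].append([a_values[pa], b_values[pb]])
--
--             pa += 1
--         else:
--             pb -= 1
--
--     ans = []
--     for pair in sum_dict[max_sum]:
--         a_indexes = a_dict[pair[0]]
--         b_indexes = b_dict[pair[1]]
--
--         ans += list(itertools.product(a_indexes, b_indexes))
--
--     return ans
-- ===== SOURCE B (Python) =====
-- import collections
-- import itertools
-- from typing import List
--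
--
-- def optional_utilization(a: List[List[int]], b: List[List[int]], target: int) -> List[List[int]]:
--     a_dict = collections.defaultdict(list)
--     for e in a:
--         id, value = e
--         a_dict[value].append(id)
--
--     b_dict = collections.defaultdict(list)
--     for e in b:
--         id, value = e
--         b_dict[value].append(id)
--
--     # best sum reachable: largest av+bv with 0 <= av+bv <= target (-1 if none,
--     # matching A's max_sum = 0 initialisation which never records negative sums)
--     best = -1
--     for av in a_dict:
--         for bv in b_dict:
--             s = av + bv
--             if 0 <= s <= target and s > best:
--                 best = s
--
--     if best < 0:
--         return []
--
--     ans = []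
--     for av in sorted(a_dict):
--         if best - av in b_dict:
--             ans += itertools.product(a_dict[av], b_dict[best - av])
--     return ans
-- ===== Notes on version B (the rewrite author's own statement) =====
-- stated objective: simpler
-- what changed: The two-pointer sweep over sorted value lists plus a sum-keyed defaultdict of candidate value pairs is replaced by a direct nested max over the distinct values (best admissible sum) followed by one pass over the ascending a-values emitting products where best-av is a b-value.
import Mathlib
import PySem

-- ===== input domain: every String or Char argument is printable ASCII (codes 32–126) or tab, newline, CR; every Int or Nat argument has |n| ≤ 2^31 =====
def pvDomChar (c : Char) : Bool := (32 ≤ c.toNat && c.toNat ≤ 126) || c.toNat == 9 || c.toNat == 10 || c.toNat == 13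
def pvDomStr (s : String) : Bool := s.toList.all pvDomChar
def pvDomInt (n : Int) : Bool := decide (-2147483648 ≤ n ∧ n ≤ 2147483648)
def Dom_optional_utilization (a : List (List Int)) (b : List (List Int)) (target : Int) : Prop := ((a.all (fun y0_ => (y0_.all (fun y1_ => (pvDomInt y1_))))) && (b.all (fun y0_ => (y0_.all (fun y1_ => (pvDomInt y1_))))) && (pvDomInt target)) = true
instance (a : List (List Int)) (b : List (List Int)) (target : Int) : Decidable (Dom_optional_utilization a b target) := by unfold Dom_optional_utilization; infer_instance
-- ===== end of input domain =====

-- B replaces A's two-pointer sweep with its sum-keyed defaultdict of candidate value pairs by a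
-- direct nested max over the distinct values followed by one ascending pass emitting the id
-- products (objective: simpler).

-- ===== PORT A =====
-- shared helper: both Pythons build a_dict / b_dict with the identical grouping loop
-- ('id, value = e' ported via pyGetD; exact under Pre_, which demands length-2 rows)
def pvGroup (l : List (List Int)) : PySem.Dict Int (List Int) :=
  l.foldl (fun d e => d.modify (PySem.List.pyGetD e 1 0) [] (fun v => v ++ [PySem.List.pyGetD e 0 0])) PySem.Dict.empty

-- itertools.product(xs, ys) as a list of pairs (ported by hand; exact)
def pvProduct (xs ys : List Int) : List (Int × Int) := xs.flatMap (fun x => ys.map (fun y => (x, y)))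

-- A's while loop over state (pa, pb, sum_dict, max_sum)
def pvLoopA (aV bV : List Int) (t : Int) (pa : Nat) (pb : Int)
    (d : PySem.Dict Int (List (Int × Int))) (m : Int) :
    PySem.Dict Int (List (Int × Int)) × Int :=
  if h : pa < aV.length ∧ 0 ≤ pb then
    let s := PySem.List.pyGetD aV (pa : Int) 0 + PySem.List.pyGetD bV pb 0
    if s ≤ t then
      if m ≤ s then
        pvLoopA aV bV t (pa + 1) pb
          (d.modify s [] (fun v => v ++ [(PySem.List.pyGetD aV (pa : Int) 0, PySem.List.pyGetD bV pb 0)])) s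
      else
        pvLoopA aV bV t (pa + 1) pb d m
    else
      pvLoopA aV bV t pa (pb - 1) d m
  else (d, m)
termination_by (aV.length - pa, (pb + 1).toNat)
decreasing_by
  · left; omega
  · left; omega
  · right; omega

def optional_utilization (a : List (List Int)) (b : List (List Int)) (target : Int) : List (Int × Int) :=
  let aDict := pvGroup a
  let bDict := pvGroup b
  let aValues := PySem.List.sorted aDict.keys (fun x => x) false
  let bValues := PySem.List.sorted bDict.keys (fun x => x) false
  let r := pvLoopA aValues bValues target 0 (PySem.List.len bValues - 1) PySem.Dict.empty 0
  (r.1.getD r.2 []).foldl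
    (fun ans pair => ans ++ pvProduct (aDict.getD pair.1 []) (bDict.getD pair.2 [])) []

-- ===== PORT B =====
def optional_utilization_alt (a : List (List Int)) (b : List (List Int)) (target : Int) : List (Int × Int) :=
  let aDict := pvGroup a
  let bDict := pvGroup b
  let best := aDict.keys.foldl (fun acc av =>
    bDict.keys.foldl (fun acc2 bv =>
      if 0 ≤ av + bv ∧ av + bv ≤ target ∧ acc2 < av + bv then av + bv else acc2) acc) (-1)
  if best < 0 then []
  else
    (PySem.List.sorted aDict.keys (fun x => x) false).foldl
      (fun ans av =>
        if bDict.contains (best - av) then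
          ans ++ pvProduct (aDict.getD av []) (bDict.getD (best - av) [])
        else ans) []

-- ===== PRECONDITION & SPEC =====
-- Pre_ excludes exactly the inputs where Python A raises: a row of a or b that is not a
-- length-2 [id, value] pair makes the unpacking 'id, value = e' raise ValueError.
def Pre_optional_utilization (a : List (List Int)) (b : List (List Int)) (target : Int) : Prop :=
  (∀ e ∈ a, e.length = 2) ∧ (∀ e ∈ b, e.length = 2)
instance (a : List (List Int)) (b : List (List Int)) (target : Int) : Decidable (Pre_optional_utilization a b target) := by unfold Pre_optional_utilization; infer_instance

def pvWitness_optional_utilization : List (List Int) × List (List Int) × Int :=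
  ([[1, 2], [2, 3], [3, 2]], [[1, 5], [2, 4]], 7)

def Spec_optional_utilization (a : List (List Int)) (b : List (List Int)) (target : Int) (out : List (Int × Int)) : Prop := out = optional_utilization_alt a b target
instance (a : List (List Int)) (b : List (List Int)) (target : Int) (out : List (Int × Int)) : Decidable (Spec_optional_utilization a b target out) := by unfold Spec_optional_utilization; infer_instance

-- ===== CLAIM (what is proved, stated in full; the proofs are below) =====
def Claim_equal_optional_utilization : Prop := ∀ (a : List (List Int)) (b : List (List Int)) (target : Int), Dom_optional_utilization a b target → Pre_optional_utilization a b target → Spec_optional_utilization a b target (optional_utilization a b target)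

-- ===== LEMMAS AND PROOFS =====

-- the largest b-value bv with av + bv ≤ t (none if no such bv)
def pvBFor (bV : List Int) (t av : Int) : Option Int :=
  PySem.List.max? (bV.filter (fun bv => decide (av + bv ≤ t))) (fun x => x)

-- per-a-value best sums, in a-value order
def pvSums (aV bV : List Int) (t : Int) : List Int :=
  aV.filterMap (fun av => (pvBFor bV t av).map (fun bv => av + bv))

-- the value pairs A records at key k, in a-value order (valid for k ≥ the final max_sum)
def pvRec (aV bV : List Int) (t k : Int) : List (Int × Int) :=
  aV.filterMap (fun av => match pvBFor bV t av with
    | some bv => if av + bv = k then some (av, bv) else none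
    | none => none)

lemma pvBFor_none (bV : List Int) (t av : Int) (H : ∀ bv ∈ bV, t < av + bv) : pvBFor bV t av = none := by
  unfold pvBFor
  rw [List.filter_eq_nil_iff.mpr (by intro x hx; simpa using by linarith [H x hx])]
  simp [PySem.List.max?]

lemma pvBFor_eq (bV : List Int) (t av c : Int) (hc : c ∈ bV) (hle : av + c ≤ t)
    (hmax : ∀ x ∈ bV, av + x ≤ t → x ≤ c) : pvBFor bV t av = some c := by
  unfold pvBFor
  have hcF : c ∈ bV.filter (fun bv => decide (av + bv ≤ t)) := by
    simp [List.mem_filter, hc, hle]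
  rcases hmx : PySem.List.max? (bV.filter (fun bv => decide (av + bv ≤ t))) (fun x => x) with _ | mx
  · rw [PySem.List.max?_eq_none_iff] at hmx
    simp [hmx] at hcF
  · have h1 := PySem.List.max?_mem hmx
    have h2 := PySem.List.max?_isMax hmx c hcF
    simp only [List.mem_filter, decide_eq_true_eq] at h1
    have := hmax mx h1.1 h1.2
    have : mx = c := by omega
    simp [this]

lemma pv_mem_drop (bV : List Int) (hB : bV.Pairwise (· < ·)) (pbn : Nat) (hpbn : pbn < bV.length)
    (x : Int) (hx : x ∈ bV) (hgt : bV[pbn] < x) : x ∈ bV.drop (pbn + 1) := by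
  obtain ⟨j, hj, rfl⟩ := List.mem_iff_getElem.mp hx
  have hmono := List.pairwise_iff_getElem.mp hB
  have hj' : pbn < j := by
    by_contra hle
    rcases Nat.lt_or_ge j pbn with hlt | hge
    · exact absurd (hmono j pbn hj hpbn hlt) (by omega)
    · have : j = pbn := by omega
      subst this; omega
  have : bV[j] = (bV.drop (pbn + 1))[j - (pbn + 1)]'(by simp; omega) := by
    rw [List.getElem_drop]; congr 1; omega
  rw [this]; exact List.getElem_mem _

lemma pv_head_le (aV : List Int) (hA : aV.Pairwise (· < ·)) (pa : Nat) (hpa : pa < aV.length)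
    (x : Int) (hx : x ∈ aV.drop pa) : aV[pa] ≤ x := by
  have hdp : (aV.drop pa).Pairwise (· < ·) := hA.sublist (List.drop_sublist pa aV)
  rw [List.drop_eq_getElem_cons hpa] at hx hdp
  rcases List.mem_cons.mp hx with h | h
  · omega
  · exact le_of_lt (List.rel_of_pairwise_cons hdp h)

-- invariant of A's two-pointer loop: the final max_sum is the running max of the per-a-value best
-- sums over the remaining a-values, and for any key k at least that max the final sum_dict entry
-- at k is the old entry plus the recorded value pairs of the remaining region
theorem pvLoopA_spec (aV bV : List Int) (t : Int)
    (hA : aV.Pairwise (· < ·)) (hB : bV.Pairwise (· < ·)) :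
    ∀ (pa : Nat) (pb : Int) (d : PySem.Dict Int (List (Int × Int))) (m : Int),
    pb < (bV.length : Int) →
    (∀ av ∈ aV.drop pa, ∀ bv ∈ bV.drop (pb + 1).toNat, t < av + bv) →
    (pvLoopA aV bV t pa pb d m).2 = (pvSums (aV.drop pa) bV t).foldl max m
    ∧ ∀ k, (pvSums (aV.drop pa) bV t).foldl max m ≤ k →
        (pvLoopA aV bV t pa pb d m).1.getD k [] = d.getD k [] ++ pvRec (aV.drop pa) bV t k := by
  intro pa pb d m
  induction pa, pb, d, m using pvLoopA.induct (aV := aV) (bV := bV) (t := t) with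
  | case1 pa pb d m h s hst hms ih =>
    intro hpb H2
    obtain ⟨hpa, hpb0⟩ := h
    have hpbn : pb.toNat < bV.length := by omega
    have hga : PySem.List.pyGetD aV (pa : Int) 0 = aV[pa] := by
      rw [PySem.List.pyGetD_natCast]; exact List.getD_eq_getElem _ _ hpa
    have hgb : PySem.List.pyGetD bV pb 0 = bV[pb.toNat] := by
      exact PySem.List.pyGetD_eq_getElem bV 0 hpb0 (by exact_mod_cast hpb)
    have hsE : s = aV[pa] + bV[pb.toNat] := by simp only [s, hga, hgb]
    have hcons : aV.drop pa = aV[pa] :: aV.drop (pa + 1) := List.drop_eq_getElem_cons hpa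
    have hmemA : aV[pa] ∈ aV.drop pa := by rw [hcons]; exact List.mem_cons_self
    have hz2 : (pb + 1).toNat = pb.toNat + 1 := by omega
    have hbfor : pvBFor bV t aV[pa] = some bV[pb.toNat] := by
      refine pvBFor_eq bV t _ _ (List.getElem_mem _) (by omega) ?_
      intro x hx hxle
      by_contra hgt
      have hxd : x ∈ bV.drop (pb.toNat + 1) := pv_mem_drop bV hB pb.toNat hpbn x hx (by omega)
      rw [hz2] at H2
      exact absurd (H2 aV[pa] hmemA x hxd) (by omega)
    have hsums : pvSums (aV.drop pa) bV t = (aV[pa] + bV[pb.toNat]) :: pvSums (aV.drop (pa + 1)) bV t := by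
      rw [hcons]; unfold pvSums; rw [List.filterMap_cons, hbfor]; rfl
    have hrec : ∀ k, pvRec (aV.drop pa) bV t k =
        if aV[pa] + bV[pb.toNat] = k then (aV[pa], bV[pb.toNat]) :: pvRec (aV.drop (pa + 1)) bV t k
        else pvRec (aV.drop (pa + 1)) bV t k := by
      intro k
      rw [hcons]; unfold pvRec; rw [List.filterMap_cons, hbfor]
      by_cases hik : aV[pa] + bV[pb.toNat] = k
      · simp [hik]
      · simp [hik]
    have H2' : ∀ av ∈ aV.drop (pa + 1), ∀ bv ∈ bV.drop (pb + 1).toNat, t < av + bv := by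
      intro av hav
      exact H2 av (by rw [hcons]; exact List.mem_cons_of_mem _ hav)
    obtain ⟨ih1, ih2⟩ := ih hpb H2'
    rw [pvLoopA, dif_pos ⟨hpa, hpb0⟩, if_pos hst, if_pos hms]
    simp only [hga, hgb]
    simp only [hsE, hga, hgb] at ih1 ih2
    rw [hsE] at hst hms
    constructor
    · rw [ih1, hsums, List.foldl_cons, max_eq_right hms]
    · intro k hk
      rw [hsums, List.foldl_cons, max_eq_right hms] at hk
      rw [ih2 k hk, hrec k]
      rw [PySem.Dict.getD_modify]
      by_cases hks : k = aV[pa] + bV[pb.toNat]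
      · rw [if_pos hks, if_pos hks.symm, hks, List.append_assoc]
        rfl
      · rw [if_neg hks, if_neg (fun hh => hks hh.symm)]
  | case2 pa pb d m h s hst hms ih =>
    intro hpb H2
    obtain ⟨hpa, hpb0⟩ := h
    have hpbn : pb.toNat < bV.length := by omega
    have hga : PySem.List.pyGetD aV (pa : Int) 0 = aV[pa] := by
      rw [PySem.List.pyGetD_natCast]; exact List.getD_eq_getElem _ _ hpa
    have hgb : PySem.List.pyGetD bV pb 0 = bV[pb.toNat] := by
      exact PySem.List.pyGetD_eq_getElem bV 0 hpb0 (by exact_mod_cast hpb)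
    have hsE : s = aV[pa] + bV[pb.toNat] := by simp only [s, hga, hgb]
    have hcons : aV.drop pa = aV[pa] :: aV.drop (pa + 1) := List.drop_eq_getElem_cons hpa
    have hmemA : aV[pa] ∈ aV.drop pa := by rw [hcons]; exact List.mem_cons_self
    have hz2 : (pb + 1).toNat = pb.toNat + 1 := by omega
    have hbfor : pvBFor bV t aV[pa] = some bV[pb.toNat] := by
      refine pvBFor_eq bV t _ _ (List.getElem_mem _) (by omega) ?_
      intro x hx hxle
      by_contra hgt
      have hxd : x ∈ bV.drop (pb.toNat + 1) := pv_mem_drop bV hB pb.toNat hpbn x hx (by omega)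
      rw [hz2] at H2
      exact absurd (H2 aV[pa] hmemA x hxd) (by omega)
    have hsums : pvSums (aV.drop pa) bV t = (aV[pa] + bV[pb.toNat]) :: pvSums (aV.drop (pa + 1)) bV t := by
      rw [hcons]; unfold pvSums; rw [List.filterMap_cons, hbfor]; rfl
    have hrec : ∀ k, pvRec (aV.drop pa) bV t k =
        if aV[pa] + bV[pb.toNat] = k then (aV[pa], bV[pb.toNat]) :: pvRec (aV.drop (pa + 1)) bV t k
        else pvRec (aV.drop (pa + 1)) bV t k := by
      intro k
      rw [hcons]; unfold pvRec; rw [List.filterMap_cons, hbfor]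
      by_cases hik : aV[pa] + bV[pb.toNat] = k
      · simp [hik]
      · simp [hik]
    have H2' : ∀ av ∈ aV.drop (pa + 1), ∀ bv ∈ bV.drop (pb + 1).toNat, t < av + bv := by
      intro av hav
      exact H2 av (by rw [hcons]; exact List.mem_cons_of_mem _ hav)
    obtain ⟨ih1, ih2⟩ := ih hpb H2'
    rw [pvLoopA, dif_pos ⟨hpa, hpb0⟩, if_pos hst, if_neg hms]
    rw [hsE] at hst hms
    constructor
    · rw [ih1, hsums, List.foldl_cons, max_eq_left (by omega)]
    · intro k hk
      rw [hsums, List.foldl_cons, max_eq_left (by omega)] at hk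
      have hmle : m ≤ List.foldl max m (pvSums (aV.drop (pa + 1)) bV t) :=
        (PySem.List.le_foldl_max _ m).1
      rw [ih2 k hk, hrec k, if_neg (by omega)]
  | case3 pa pb d m h s hs ih =>
    intro hpb H2
    obtain ⟨hpa, hpb0⟩ := h
    have hpbn : pb.toNat < bV.length := by omega
    have hga : PySem.List.pyGetD aV (pa : Int) 0 = aV[pa] := by
      rw [PySem.List.pyGetD_natCast]; exact List.getD_eq_getElem _ _ hpa
    have hgb : PySem.List.pyGetD bV pb 0 = bV[pb.toNat] := by
      exact PySem.List.pyGetD_eq_getElem bV 0 hpb0 (by exact_mod_cast hpb)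
    have hs' : t < aV[pa] + bV[pb.toNat] := by
      simp only [s, hga, hgb] at hs; omega
    rw [pvLoopA, dif_pos ⟨hpa, hpb0⟩, if_neg hs]
    refine ih (by omega) ?_
    intro av hav bv hbv
    have hz : (pb - 1 + 1).toNat = pb.toNat := by omega
    rw [hz, List.drop_eq_getElem_cons hpbn] at hbv
    rcases List.mem_cons.mp hbv with hbv | hbv
    · subst hbv
      have := pv_head_le aV hA pa hpa av hav
      omega
    · have hz2 : (pb + 1).toNat = pb.toNat + 1 := by omega
      rw [hz2] at H2
      exact H2 av hav bv hbv
  | case4 pa pb d m h =>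
    intro hpb H2
    rw [pvLoopA, dif_neg h]
    rcases Nat.lt_or_ge pa aV.length with hpa | hpa
    · have hpb0 : pb < 0 := by
        rcases not_and_or.mp h with h1 | h2
        · omega
        · omega
      have hz : (pb + 1).toNat = 0 := by omega
      rw [hz] at H2
      simp only [List.drop_zero] at H2
      have hnil : pvSums (aV.drop pa) bV t = [] := by
        unfold pvSums
        rw [List.filterMap_eq_nil_iff]
        intro av hav
        rw [pvBFor_none bV t av (H2 av hav)]
        rfl
      constructor
      · simp [hnil]
      · intro k hk
        unfold pvRec
        rw [List.filterMap_eq_nil_iff.mpr ?_]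
        · simp
        · intro av hav
          rw [pvBFor_none bV t av (H2 av hav)]
    · have hnil : aV.drop pa = [] := List.drop_eq_nil_of_le hpa
      rw [hnil]
      constructor
      · simp [pvSums]
      · intro k hk; simp [pvRec]

-- characterisation of B's inner max loop over the b-values
lemma pvInner_spec (B : List Int) (t av : Int) : ∀ acc : Int,
    (acc ≤ B.foldl (fun a2 bv => if 0 ≤ av + bv ∧ av + bv ≤ t ∧ a2 < av + bv then av + bv else a2) acc)
    ∧ (B.foldl (fun a2 bv => if 0 ≤ av + bv ∧ av + bv ≤ t ∧ a2 < av + bv then av + bv else a2) acc = acc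
        ∨ (0 ≤ B.foldl (fun a2 bv => if 0 ≤ av + bv ∧ av + bv ≤ t ∧ a2 < av + bv then av + bv else a2) acc
           ∧ B.foldl (fun a2 bv => if 0 ≤ av + bv ∧ av + bv ≤ t ∧ a2 < av + bv then av + bv else a2) acc ≤ t
           ∧ ∃ bv ∈ B, av + bv = B.foldl (fun a2 bv => if 0 ≤ av + bv ∧ av + bv ≤ t ∧ a2 < av + bv then av + bv else a2) acc))
    ∧ (∀ bv ∈ B, 0 ≤ av + bv → av + bv ≤ t →
        av + bv ≤ B.foldl (fun a2 bv => if 0 ≤ av + bv ∧ av + bv ≤ t ∧ a2 < av + bv then av + bv else a2) acc) := by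
  induction B with
  | nil => intro acc; simp
  | cons b bs ih =>
    intro acc
    simp only [List.foldl_cons]
    by_cases hb : 0 ≤ av + b ∧ av + b ≤ t ∧ acc < av + b
    · rw [if_pos hb]
      obtain ⟨i1, i2, i3⟩ := ih (av + b)
      refine ⟨by omega, ?_, ?_⟩
      · rcases i2 with h | ⟨h0, ht, bv, hbv, he⟩
        · exact Or.inr ⟨by omega, by omega, b, List.mem_cons_self, h.symm⟩
        · exact Or.inr ⟨h0, ht, bv, List.mem_cons_of_mem _ hbv, he⟩
      · intro bv hbv h0 hle
        rcases List.mem_cons.mp hbv with rfl | hbv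
        · omega
        · exact i3 bv hbv h0 hle
    · rw [if_neg hb]
      obtain ⟨i1, i2, i3⟩ := ih acc
      refine ⟨i1, ?_, ?_⟩
      · rcases i2 with h | ⟨h0, ht, bv, hbv, he⟩
        · exact Or.inl h
        · exact Or.inr ⟨h0, ht, bv, List.mem_cons_of_mem _ hbv, he⟩
      · intro bv hbv h0 hle
        rcases List.mem_cons.mp hbv with rfl | hbv
        · omega
        · exact i3 bv hbv h0 hle

-- characterisation of B's nested max loop: the result bounds every admissible value pair,
-- and is either the start value or an admissible sum
lemma pvBest_spec (A B : List Int) (t : Int) : ∀ acc : Int,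
    (acc ≤ A.foldl (fun acc av => B.foldl (fun a2 bv => if 0 ≤ av + bv ∧ av + bv ≤ t ∧ a2 < av + bv then av + bv else a2) acc) acc)
    ∧ (A.foldl (fun acc av => B.foldl (fun a2 bv => if 0 ≤ av + bv ∧ av + bv ≤ t ∧ a2 < av + bv then av + bv else a2) acc) acc = acc
        ∨ (0 ≤ A.foldl (fun acc av => B.foldl (fun a2 bv => if 0 ≤ av + bv ∧ av + bv ≤ t ∧ a2 < av + bv then av + bv else a2) acc) acc
           ∧ A.foldl (fun acc av => B.foldl (fun a2 bv => if 0 ≤ av + bv ∧ av + bv ≤ t ∧ a2 < av + bv then av + bv else a2) acc) acc ≤ t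
           ∧ ∃ av ∈ A, ∃ bv ∈ B, av + bv = A.foldl (fun acc av => B.foldl (fun a2 bv => if 0 ≤ av + bv ∧ av + bv ≤ t ∧ a2 < av + bv then av + bv else a2) acc) acc))
    ∧ (∀ av ∈ A, ∀ bv ∈ B, 0 ≤ av + bv → av + bv ≤ t →
        av + bv ≤ A.foldl (fun acc av => B.foldl (fun a2 bv => if 0 ≤ av + bv ∧ av + bv ≤ t ∧ a2 < av + bv then av + bv else a2) acc) acc) := by
  induction A with
  | nil => intro acc; simp
  | cons a as ih =>
    intro acc
    simp only [List.foldl_cons]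
    obtain ⟨j1, j2, j3⟩ := pvInner_spec B t a acc
    obtain ⟨i1, i2, i3⟩ := ih (B.foldl (fun a2 bv => if 0 ≤ a + bv ∧ a + bv ≤ t ∧ a2 < a + bv then a + bv else a2) acc)
    refine ⟨by omega, ?_, ?_⟩
    · rcases i2 with h | ⟨h0, ht, av, hav, bv, hbv, he⟩
      · rw [h]
        rcases j2 with h2 | ⟨h0, ht, bv, hbv, he⟩
        · exact Or.inl h2
        · exact Or.inr ⟨h0, ht, a, List.mem_cons_self, bv, hbv, he⟩
      · exact Or.inr ⟨h0, ht, av, List.mem_cons_of_mem _ hav, bv, hbv, he⟩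
    · intro av hav bv hbv h0 hle
      rcases List.mem_cons.mp hav with rfl | hav
      · exact le_trans (j3 bv hbv h0 hle) i1
      · exact i3 av hav bv hbv h0 hle

lemma pv_flatMap_filterMap {α β γ : Type} (f : α → Option β) (g : β → List γ) (l : List α) :
    (l.filterMap f).flatMap g = l.flatMap (fun x => match f x with | some y => g y | none => []) := by
  induction l with
  | nil => rfl
  | cons x xs ih =>
    rw [List.filterMap_cons]
    cases hf : f x with
    | none => simp [hf, List.flatMap_cons, ih]
    | some y => simp [hf, List.flatMap_cons, ih]

lemma pv_flatMap_congr {α β : Type} (l : List α) (f g : α → List β) (h : ∀ x ∈ l, f x = g x) :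
    l.flatMap f = l.flatMap g := by
  induction l with
  | nil => rfl
  | cons x xs ih =>
    simp only [List.flatMap_cons]
    rw [h x List.mem_cons_self, ih (fun y hy => h y (List.mem_cons_of_mem _ hy))]

lemma pvGroup_keys (l : List (List Int)) :
    (pvGroup l).keys = PySem.Set.ofList (l.map (fun e => PySem.List.pyGetD e 1 0)) := by
  unfold pvGroup
  rw [PySem.Dict.keys_foldl_modify_key l (fun e => PySem.List.pyGetD e 1 0) [] (fun _ e => (fun v => v ++ [PySem.List.pyGetD e 0 0]))]
  rw [PySem.Dict.keys_empty, PySem.Set.ofList_eq_foldl]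
  rfl

lemma pvSums_mem (aV bV : List Int) (t x : Int) (h : x ∈ pvSums aV bV t) :
    ∃ av ∈ aV, ∃ mx, pvBFor bV t av = some mx ∧ x = av + mx := by
  unfold pvSums at h
  obtain ⟨av, hav, hf⟩ := List.mem_filterMap.mp h
  cases hbf : pvBFor bV t av with
  | none => rw [hbf] at hf; cases hf
  | some mx =>
    rw [hbf, Option.map_some] at hf
    exact ⟨av, hav, mx, hbf, (Option.some.inj hf).symm⟩

lemma pv_foldl_guard_append {α β : Type} (l : List α) (c : α → Bool) (g : α → List β) :
    ∀ acc, l.foldl (fun ans x => if c x = true then ans ++ g x else ans) acc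
      = acc ++ l.flatMap (fun x => if c x = true then g x else []) := by
  induction l with
  | nil => intro acc; simp
  | cons x xs ih =>
    intro acc
    simp only [List.foldl_cons, List.flatMap_cons]
    by_cases hc : c x = true
    · rw [if_pos hc, if_pos hc, ih, List.append_assoc]
    · rw [if_neg hc, if_neg hc, ih, List.nil_append]

-- ===== VERDICT (by name: the statement is the Claim_ definition above) =====
theorem optional_utilization_spec : Claim_equal_optional_utilization := by
  intro a b target _ _
  unfold Spec_optional_utilization optional_utilization optional_utilization_alt
  dsimp only
  set aK := (pvGroup a).keys with haK
  set bK := (pvGroup b).keys with hbK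
  set aV := PySem.List.sorted aK (fun x => x) false with haV
  set bV := PySem.List.sorted bK (fun x => x) false with hbV
  have hAp : aV.Pairwise (· < ·) := by
    rw [haV, haK, pvGroup_keys]; exact PySem.List.sorted_ofList_pairwise_lt _
  have hBp : bV.Pairwise (· < ·) := by
    rw [hbV, hbK, pvGroup_keys]; exact PySem.List.sorted_ofList_pairwise_lt _
  have hmemA : ∀ x : Int, x ∈ aV ↔ x ∈ aK := fun x => PySem.List.mem_sorted aK _ false x
  have hmemB : ∀ x : Int, x ∈ bV ↔ x ∈ bK := fun x => PySem.List.mem_sorted bK _ false x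
  have hpb : (bV.length : Int) - 1 < (bV.length : Int) := by omega
  have H2 : ∀ av ∈ aV.drop 0, ∀ bv ∈ bV.drop (((bV.length : Int) - 1) + 1).toNat, target < av + bv := by
    intro av _ bv hbv
    have hz : (((bV.length : Int) - 1) + 1).toNat = bV.length := by omega
    rw [hz, List.drop_length] at hbv
    cases hbv
  obtain ⟨hL1, hL2⟩ := pvLoopA_spec aV bV target hAp hBp 0 ((bV.length : Int) - 1) PySem.Dict.empty 0 hpb H2
  simp only [List.drop_zero] at hL1 hL2
  simp only [PySem.List.len_eq]
  rw [hL1, hL2 _ le_rfl, PySem.Dict.getD_empty, List.nil_append,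
    PySem.List.foldl_append_eq_flatMap, List.nil_append]
  set best := aK.foldl (fun acc av =>
    bK.foldl (fun acc2 bv =>
      if 0 ≤ av + bv ∧ av + bv ≤ target ∧ acc2 < av + bv then av + bv else acc2) acc) (-1) with hbest
  obtain ⟨B1, B2, B3⟩ := pvBest_spec aK bK target (-1)
  rw [← hbest] at B1 B2 B3
  have h0M : (0 : Int) ≤ List.foldl max 0 (pvSums aV bV target) := (PySem.List.le_foldl_max _ 0).1
  by_cases hq : ∃ av ∈ aK, ∃ bv ∈ bK, 0 ≤ av + bv ∧ av + bv ≤ target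
  · -- a pair with 0 ≤ sum ≤ target exists
    obtain ⟨av0, hav0, bv0, hbv0, h00, h0t⟩ := hq
    have hble : av0 + bv0 ≤ best := B3 av0 hav0 bv0 hbv0 h00 h0t
    rw [if_neg (show ¬ best < 0 by omega)]
    rcases B2 with h | ⟨hb0, hbt, avs, havs, bvs, hbvs, hes⟩
    · exact absurd h (by omega)
    · have hM : List.foldl max 0 (pvSums aV bV target) = best := by
        have le1 : best ≤ List.foldl max 0 (pvSums aV bV target) := by
          have hmemf : bvs ∈ bV.filter (fun x => decide (avs + x ≤ target)) := by
            simp only [List.mem_filter, decide_eq_true_eq]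
            exact ⟨(hmemB bvs).mpr hbvs, by omega⟩
          cases hbf : pvBFor bV target avs with
          | none =>
            unfold pvBFor at hbf
            rw [PySem.List.max?_eq_none_iff] at hbf
            rw [hbf] at hmemf; cases hmemf
          | some mx =>
            have hmx := PySem.List.max?_isMax (by unfold pvBFor at hbf; exact hbf) bvs hmemf
            have hmem : avs + mx ∈ pvSums aV bV target := by
              unfold pvSums
              exact List.mem_filterMap.mpr ⟨avs, (hmemA avs).mpr havs, by rw [hbf]; rfl⟩
            have := (PySem.List.le_foldl_max (pvSums aV bV target) 0).2 _ hmem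
            simp only at hmx
            omega
        have le2 : List.foldl max 0 (pvSums aV bV target) ≤ best := by
          rcases PySem.List.foldl_max_mem (pvSums aV bV target) 0 with h | h
          · omega
          · obtain ⟨av, hav, mx, hbf, hfe⟩ := pvSums_mem aV bV target _ h
            have hmxm := PySem.List.max?_mem (by unfold pvBFor at hbf; exact hbf)
            simp only [List.mem_filter, decide_eq_true_eq] at hmxm
            have := B3 av ((hmemA av).mp hav) mx ((hmemB mx).mp hmxm.1) (by omega) hmxm.2
            omega
        omega
      rw [hM]
      rw [pv_foldl_guard_append aV (fun av => (pvGroup b).contains (best - av))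
        (fun av => pvProduct ((pvGroup a).getD av []) ((pvGroup b).getD (best - av) [])) [],
        List.nil_append]
      unfold pvRec
      rw [pv_flatMap_filterMap]
      refine pv_flatMap_congr _ _ _ ?_
      intro av hav
      by_cases hc : (pvGroup b).contains (best - av) = true
      · have hmemb : best - av ∈ bV :=
          (hmemB _).mpr ((PySem.Dict.contains_iff_mem_keys _ _).mp hc)
        have hbf : pvBFor bV target av = some (best - av) := by
          refine pvBFor_eq bV target av (best - av) hmemb (by omega) ?_
          intro x hx hxle
          by_cases h0x : 0 ≤ av + x
          · have := B3 av ((hmemA av).mp hav) x ((hmemB x).mp hx) h0x hxle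
            omega
          · omega
        simp only [hbf]
        rw [if_pos (by omega : av + (best - av) = best), if_pos hc]
      · cases hbf : pvBFor bV target av with
        | none => simp [hc]
        | some bv =>
          have hne : av + bv ≠ best := by
            intro he
            have hmxm := PySem.List.max?_mem (by unfold pvBFor at hbf; exact hbf)
            simp only [List.mem_filter, decide_eq_true_eq] at hmxm
            have hbve : bv = best - av := by omega
            rw [hbve] at hmxm
            exact hc ((PySem.Dict.contains_iff_mem_keys _ _).mpr ((hmemB _).mp hmxm.1))
          simp [hc, hne]
  · -- no admissible pair: both sides are empty
    have hbest1 : best = -1 := by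
      rcases B2 with h | ⟨h0, ht, av, hav, bv, hbv, he⟩
      · exact h
      · exact absurd ⟨av, hav, bv, hbv, by omega, by omega⟩ hq
    rw [if_pos (show best < 0 by omega)]
    have hrecnil : pvRec aV bV target (List.foldl max 0 (pvSums aV bV target)) = [] := by
      unfold pvRec
      rw [List.filterMap_eq_nil_iff]
      intro av hav
      cases hbf : pvBFor bV target av with
      | none => rfl
      | some bv =>
        have hmem := PySem.List.max?_mem (by unfold pvBFor at hbf; exact hbf)
        simp only [List.mem_filter, decide_eq_true_eq] at hmem
        dsimp only
        rw [if_neg]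
        intro he
        exact hq ⟨av, (hmemA av).mp hav, bv, (hmemB bv).mp hmem.1, by omega, by omega⟩
    rw [hrecnil]
    rfl
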